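-- pv_equiv track=rewrite | github.com/ederalab/python-workbook | es_95_pwb.py | capitalizeIt
-- ===== SOURCE A (Python) =====
-- def capitalizeIt(s):
--     #capitalize the first non-space character in the string
--     i = 0
--     mystring = s
--     while i < len(s) and mystring[i] == " ":
--         i = i+1
--     if i < len(s):
--         #take the substring from 0 to i + first letter to be capitalized + substring from the next letter until the end
--         mystring = mystring[0 : i] + mystring[i].upper() + mystring[i + 1:len(mystring)]
--
--     #capitalize the first non-space character after a period, exclamation mark or question mark
--     i = 0
--     while i < len(s):
--         if mystring[i]== "!" or mystring[i]=="?" or mystring[i]==".":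
--             i = i+1
--             while i < len(s) and mystring[i] == " ":
--                 i = i+1
--             if i < len(s):
--                 mystring = mystring[0 : i] + mystring[i].upper() + mystring[i + 1:len(mystring)]
--         i = i+1
--
--     #capitalize a lowercase i if it is preceded by a space and followed by a space, period, exclamation mark, question mark or apostrophe
--     i = 1
--     while i < len(s) - 1:
--         if (mystring[i-1]==" " or mystring[i-1]=="." or mystring[i-1]=="!" or mystring[i-1]=="?" or mystring[i-1]=="'") and mystring[i]=="i" and (mystring[i+1]==" " or mystring[i+1]=="." or mystring[i+1]=="!" or mystring[i+1]=="?" or mystring[i+1]=="'"):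
--             mystring = mystring[0 : i] + mystring[i].upper() + mystring[i + 1:len(mystring)]
--         i = i+1
--
--     return(mystring)
-- ===== SOURCE B (Python) =====
-- def capitalizeIt(s):
--     # Single left-to-right state machine for sentence starts, then one
--     # neighborhood scan for standalone lowercase i.  Same return value as the
--     # three-while-loop slicing version.
--     out = []
--     first = True   # first non-space char of the string still pending
--     flag = False   # a sentence end was seen, waiting for non-space
--     for c in s:
--         if first and c != ' ':
--             out.append(c.upper())
--             first = False
--             if c in '.!?':
--                 flag = True
--         elif flag and c != ' ':
--             out.append(c.upper())
--             flag = False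
--             # the freshly capitalized char never acts as a new trigger
--         else:
--             out.append(c)
--             if c in '.!?':
--                 flag = True
--     n = len(out)
--     cls = " .!?'"
--     return ''.join(
--         'I' if 0 < i < n - 1 and out[i] == 'i' and out[i-1] in cls and out[i+1] in cls
--         else out[i]
--         for i in range(n))
-- ===== Notes on version B (the rewrite author's own statement) =====
-- stated objective: faster
-- what changed: Replaced A's three index-driven while loops that rebuild the whole string by slicing at every capitalization with a single left-to-right state machine (pending-first / after-punctuation flags) over the characters plus one neighborhood scan for the standalone lowercase letter i, joined once.
import Mathlib
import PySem

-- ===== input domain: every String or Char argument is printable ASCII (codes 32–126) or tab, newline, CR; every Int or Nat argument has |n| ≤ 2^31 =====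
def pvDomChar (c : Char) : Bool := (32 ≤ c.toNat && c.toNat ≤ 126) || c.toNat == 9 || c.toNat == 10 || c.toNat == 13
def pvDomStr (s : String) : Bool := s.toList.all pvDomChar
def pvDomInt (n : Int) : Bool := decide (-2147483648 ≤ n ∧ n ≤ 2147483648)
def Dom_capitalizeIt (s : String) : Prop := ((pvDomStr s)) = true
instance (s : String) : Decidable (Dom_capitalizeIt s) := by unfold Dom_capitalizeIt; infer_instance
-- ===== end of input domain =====

-- B replaces A's three while loops that rebuild the string by slicing at every
-- capitalization with one linear flag state machine plus one neighborhood scan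
-- (objective: faster).

-- ===== PORT A =====
-- A manipulates the string by indexing and slicing; the port works on s.toList,
-- with mystring[i] (always guarded by i < len) read as l.getD i ' ' and the
-- reassembly mystring[0:i] + mystring[i].upper() + mystring[i+1:len(mystring)]
-- ported literally with PySem.List.slice.

def pvA_capAt (l : List Char) (i : Nat) : List Char :=
  PySem.List.slice l (some 0) (some (i : Int)) ++ [PySem.Chars.upperChar (l.getD i ' ')] ++
    PySem.List.slice l (some ((i : Int) + 1)) (some (l.length : Int))

-- the two 'while i < len(s) and mystring[i] == " "' loops
def pvA_skip (n : Nat) (l : List Char) (i : Nat) : Nat :=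
  if h : i < n ∧ l.getD i ' ' = ' ' then pvA_skip n l (i + 1) else i
termination_by n - i
decreasing_by omega

-- needed by pvA_loop2's termination
theorem pvA_skip_ge (n : Nat) (l : List Char) (i : Nat) : i ≤ pvA_skip n l i := by
  fun_induction pvA_skip with
  | case1 i h ih => omega
  | case2 i h => omega

-- second while loop of A (sentence starts after '.', '!' or '?')
def pvA_loop2 (n : Nat) (l : List Char) (i : Nat) : List Char :=
  if h : i < n then
    if l.getD i ' ' = '!' ∨ l.getD i ' ' = '?' ∨ l.getD i ' ' = '.' then
      let j := pvA_skip n l (i + 1)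
      let l' := if j < n then pvA_capAt l j else l
      pvA_loop2 n l' (j + 1)
    else pvA_loop2 n l (i + 1)
  else l
termination_by n - i
decreasing_by
  · have := pvA_skip_ge n l (i + 1); omega
  · omega

-- third while loop of A (standalone lowercase i)
def pvA_loop3 (n : Nat) (l : List Char) (i : Nat) : List Char :=
  if i < n - 1 then
    let l' :=
      if (l.getD (i-1) ' ' = ' ' ∨ l.getD (i-1) ' ' = '.' ∨ l.getD (i-1) ' ' = '!' ∨
            l.getD (i-1) ' ' = '?' ∨ l.getD (i-1) ' ' = '\'') ∧ l.getD i ' ' = 'i' ∧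
          (l.getD (i+1) ' ' = ' ' ∨ l.getD (i+1) ' ' = '.' ∨ l.getD (i+1) ' ' = '!' ∨
            l.getD (i+1) ' ' = '?' ∨ l.getD (i+1) ' ' = '\'')
      then pvA_capAt l i else l
    pvA_loop3 n l' (i + 1)
  else l
termination_by n - 1 - i

def capitalizeIt (s : String) : String :=
  let n := s.toList.length
  let m0 := s.toList
  let j0 := pvA_skip n m0 0
  let m1 := if j0 < n then pvA_capAt m0 j0 else m0
  let m2 := pvA_loop2 n m1 0
  let m3 := pvA_loop3 n m2 1
  String.ofList m3

-- ===== PORT B =====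
-- c in '.!?' / c in " .!?'" on a single char is membership of that char
def pvB_punct (c : Char) : Bool := ['.', '!', '?'].contains c
def pvB_cls (c : Char) : Bool := [' ', '.', '!', '?', '\''].contains c

-- the single for-loop of B with its two flags
def pvB_pass (l : List Char) (first flag : Bool) : List Char :=
  match l with
  | [] => []
  | c :: t =>
    if first && !(c == ' ') then
      PySem.Chars.upperChar c :: pvB_pass t false (flag || pvB_punct c)
    else if flag && !(c == ' ') then
      PySem.Chars.upperChar c :: pvB_pass t first false
    else
      c :: pvB_pass t first (flag || pvB_punct c)

def capitalizeIt_alt (s : String) : String :=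
  let out := pvB_pass s.toList true false
  let n := out.length
  String.ofList ((List.range n).map (fun i =>
    if 0 < i ∧ i < n - 1 ∧ out.getD i ' ' = 'i' ∧
        pvB_cls (out.getD (i-1) ' ') = true ∧ pvB_cls (out.getD (i+1) ' ') = true
    then 'I' else out.getD i ' '))

-- ===== PRECONDITION & SPEC =====
def Spec_capitalizeIt (s : String) (out : String) : Prop := out = capitalizeIt_alt s
instance (s : String) (out : String) : Decidable (Spec_capitalizeIt s out) := by unfold Spec_capitalizeIt; infer_instance

-- ===== CLAIM (what is proved, stated in full; the proofs are below) =====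
def Claim_equal_capitalizeIt : Prop := ∀ (s : String), Dom_capitalizeIt s → Spec_capitalizeIt s (capitalizeIt s)

-- ===== LEMMAS AND PROOFS =====

-- ---- character facts ----

theorem pv_islower_toNat (c : Char) (h : PySem.Chars.islower c = true) :
    97 ≤ c.toNat ∧ c.toNat ≤ 122 := by
  simp [PySem.Chars.islower, Char.le_def, UInt32.le_iff_toNat_le] at h
  exact h

theorem pv_toNat_ofNat (n : Nat) (h : n < 55296) : (Char.ofNat n).toNat = n := by
  simp [Char.ofNat, Nat.isValidChar, h]

theorem pv_toNat_upper (c : Char) (h : PySem.Chars.islower c = true) :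
    (PySem.Chars.upperChar c).toNat = c.toNat - 32 := by
  have hb := pv_islower_toNat c h
  unfold PySem.Chars.upperChar
  rw [if_pos h]
  exact pv_toNat_ofNat _ (by omega)

theorem pv_ne_of_toNat {c d : Char} (h : c.toNat ≠ d.toNat) : c ≠ d :=
  fun he => h (by rw [he])

theorem pv_punct_iff (c : Char) :
    (c = '!' ∨ c = '?' ∨ c = '.') ↔ pvB_punct c = true := by
  simp [pvB_punct]; tauto

theorem pv_cls_iff (c : Char) :
    (c = ' ' ∨ c = '.' ∨ c = '!' ∨ c = '?' ∨ c = '\'') ↔ pvB_cls c = true := by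
  simp [pvB_cls]

theorem pv_punct_upper (c : Char) : pvB_punct (PySem.Chars.upperChar c) = pvB_punct c := by
  by_cases h : PySem.Chars.islower c = true
  · have hb := pv_islower_toNat c h
    have hu := pv_toNat_upper c h
    have v1 : ('.' : Char).toNat = 46 := rfl
    have v2 : ('!' : Char).toNat = 33 := rfl
    have v3 : ('?' : Char).toNat = 63 := rfl
    have h1 : pvB_punct c = false := by
      simp [pvB_punct]
      refine ⟨?_, ?_, ?_⟩ <;> · apply pv_ne_of_toNat; omega
    have h2 : pvB_punct (PySem.Chars.upperChar c) = false := by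
      simp [pvB_punct]
      refine ⟨?_, ?_, ?_⟩ <;> · apply pv_ne_of_toNat; rw [hu]; omega
    rw [h1, h2]
  · unfold PySem.Chars.upperChar
    rw [if_neg h]

theorem pv_punct_space : pvB_punct ' ' = false := by decide

theorem pv_upper_i : PySem.Chars.upperChar 'i' = 'I' := by decide

-- ---- generic list facts used throughout ----

theorem pv_getD_lt (l : List Char) (k : Nat) (h : k < l.length) : l.getD k ' ' = l[k] := by
  simp [List.getD_eq_getElem?_getD, List.getElem?_eq_getElem h]

theorem pv_getD_set_ne (l : List Char) (u : Char) (j k : Nat) (h : k ≠ j) :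
    (l.set j u).getD k ' ' = l.getD k ' ' := by
  simp [List.getD_eq_getElem?_getD, List.getElem?_set_ne (by omega : j ≠ k)]

theorem pv_drop_eq_of_agree (l l' : List Char) (i : Nat) (hlen : l.length = l'.length)
    (h : ∀ k, i ≤ k → l.getD k ' ' = l'.getD k ' ') : l.drop i = l'.drop i := by
  apply List.ext_getElem (by simp [hlen])
  intro k h1 h2
  have hk : i + k < l.length := by simp at h1; omega
  have hk' : i + k < l'.length := by omega
  rw [List.getElem_drop, List.getElem_drop]
  have hh := h (i + k) (by omega)
  rw [pv_getD_lt l _ hk, pv_getD_lt l' _ hk'] at hh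
  exact hh

theorem pv_capAt_eq_set (l : List Char) (i : Nat) (h : i < l.length) :
    pvA_capAt l i = l.set i (PySem.Chars.upperChar (l.getD i ' ')) := by
  unfold pvA_capAt
  rw [PySem.List.slice_toNat l (a := 0) (b := (i : Int)) (by omega) (by omega),
    PySem.List.slice_toNat l (a := (i : Int) + 1) (b := (l.length : Int)) (by omega) (by omega)]
  simp only [Int.toNat_zero, List.drop_zero, Nat.sub_zero]
  have h1 : ((i : Int)).toNat = i := by omega
  have h2 : ((i : Int) + 1).toNat = i + 1 := by omega
  have h3 : ((l.length : Int)).toNat = l.length := by omega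
  rw [h1, h2, h3]
  have h4 : List.take (l.length - (i + 1)) (List.drop (i + 1) l) = List.drop (i + 1) l :=
    List.take_of_length_le (by simp)
  rw [h4, List.set_eq_take_append_cons_drop, if_pos h]
  simp

theorem pv_set_take_succ (l : List Char) (j : Nat) (u : Char) (h : j < l.length) :
    (l.set j u).take (j + 1) = l.take j ++ [u] := by
  rw [List.set_eq_take_append_cons_drop, if_pos h]
  have hl : (l.take j).length = j := by simp; omega
  rw [List.take_append, hl]
  have h1 : List.take (j + 1) (List.take j l) = List.take j l :=
    List.take_of_length_le (by rw [hl]; omega)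
  have h2 : j + 1 - j = 1 := by omega
  rw [h1, h2]
  simp

theorem pv_take_succ_getD (l : List Char) (i : Nat) (h : i < l.length) :
    l.take (i + 1) = l.take i ++ [l.getD i ' '] := by
  rw [List.take_add_one, List.getElem?_eq_getElem h, pv_getD_lt l i h]
  rfl

-- ---- pvA_skip characterization ----

theorem pvA_skip_le (n : Nat) (l : List Char) (i : Nat) (h : i ≤ n) : pvA_skip n l i ≤ n := by
  fun_induction pvA_skip with
  | case1 i h' ih => exact ih (by omega)
  | case2 i h' => exact h

theorem pvA_skip_spaces (n : Nat) (l : List Char) (i : Nat) :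
    ∀ k, i ≤ k → k < pvA_skip n l i → l.getD k ' ' = ' ' := by
  fun_induction pvA_skip with
  | case1 i h ih =>
    intro k hk1 hk2
    rcases Nat.eq_or_lt_of_le hk1 with he | hl
    · rw [← he]; exact h.2
    · exact ih k (by omega) hk2
  | case2 i h => intro k hk1 hk2; omega

theorem pvA_skip_stop (n : Nat) (l : List Char) (i : Nat) (h : pvA_skip n l i < n) :
    l.getD (pvA_skip n l i) ' ' ≠ ' ' := by
  fun_induction pvA_skip with
  | case1 i h' ih => exact ih h
  | case2 i h' =>
    intro hsp
    exact h' ⟨h, hsp⟩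

-- ---- pvB_pass basic facts ----

theorem pvB_pass_length (l : List Char) : ∀ first flag, (pvB_pass l first flag).length = l.length := by
  induction l with
  | nil => intro f g; rfl
  | cons c t ih =>
    intro f g
    unfold pvB_pass
    split
    · simp [ih]
    · split <;> simp [ih]

theorem pvB_pass_spaces (u v : List Char) (hu : ∀ c ∈ u, c = ' ') :
    ∀ first, pvB_pass (u ++ v) first false = u ++ pvB_pass v first false := by
  induction u with
  | nil => intro f; rfl
  | cons c t ih =>
    intro f
    have hc : c = ' ' := hu c List.mem_cons_self
    subst hc
    show pvB_pass (' ' :: (t ++ v)) f false = (' ' :: t) ++ pvB_pass v f false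
    rw [List.cons_append]
    show (if (f && !(' ' == ' ')) = true then _ else _) = _
    simp only [beq_self_eq_true, Bool.not_true, Bool.and_false, Bool.false_eq_true, if_false,
      pv_punct_space, Bool.or_false]
    rw [ih (fun c hc => hu c (List.mem_cons_of_mem _ hc))]

theorem pvB_pass_spaces_flag (u v : List Char) (hu : ∀ c ∈ u, c = ' ') :
    pvB_pass (u ++ v) false true = u ++ pvB_pass v false true := by
  induction u with
  | nil => rfl
  | cons c t ih =>
    have hc : c = ' ' := hu c List.mem_cons_self
    subst hc
    show pvB_pass (' ' :: (t ++ v)) false true = (' ' :: t) ++ pvB_pass v false true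
    rw [List.cons_append]
    show (if (false && !(' ' == ' ')) = true then _ else _) = _
    simp only [beq_self_eq_true, Bool.not_true, Bool.and_false, Bool.false_eq_true, if_false,
      Bool.true_or, pv_punct_space]
    rw [ih (fun c hc => hu c (List.mem_cons_of_mem _ hc))]

-- elements of the skipped segment are spaces
theorem pv_seg_spaces (cs : List Char) (i j : Nat) (hij : i ≤ j)
    (hsp : ∀ k, i ≤ k → k < j → cs.getD k ' ' = ' ') :
    ∀ c ∈ (cs.drop i).take (j - i), c = ' ' := by
  intro c hc
  obtain ⟨k, hk, he⟩ := List.getElem_of_mem hc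
  have hk1 : k < j - i := by simp at hk; omega
  have hk2 : i + k < cs.length := by simp at hk; omega
  rw [List.getElem_take, List.getElem_drop] at he
  rw [← he, ← pv_getD_lt cs (i + k) hk2]
  exact hsp (i + k) (by omega) (by omega)

-- decomposition of cs.drop i at the skip target j
theorem pv_drop_decomp (cs : List Char) (i j : Nat) (hij : i ≤ j) (hj : j < cs.length) :
    cs.drop i = (cs.drop i).take (j - i) ++ cs.getD j ' ' :: cs.drop (j + 1) := by
  conv_lhs => rw [← List.take_append_drop (j - i) (cs.drop i)]
  congr 1
  rw [List.drop_drop]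
  have he : i + (j - i) = j := by omega
  rw [he, List.drop_eq_getElem_cons hj, pv_getD_lt cs j hj]

-- ---- the main simulation: A's pass 1+2 equals B's state machine ----

-- one-step unfoldings of pvB_pass in the three states the simulation meets
theorem pv_pass_cons_ff (c : Char) (t : List Char) :
    pvB_pass (c :: t) false false = c :: pvB_pass t false (pvB_punct c) := by
  simp [pvB_pass]

theorem pv_pass_cons_ft (c : Char) (t : List Char) (hc : c ≠ ' ') :
    pvB_pass (c :: t) false true = PySem.Chars.upperChar c :: pvB_pass t false false := by
  simp [pvB_pass, hc]

theorem pv_pass_cons_tf (c : Char) (t : List Char) (hc : c ≠ ' ') :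
    pvB_pass (c :: t) true false = PySem.Chars.upperChar c :: pvB_pass t false (pvB_punct c) := by
  simp [pvB_pass, hc]

theorem pv_loop2_stop (n : Nat) (l : List Char) (i : Nat) (h : ¬ i < n) :
    pvA_loop2 n l i = l := by
  rw [pvA_loop2, dif_neg h]

theorem pv_skip_id (n : Nat) (l : List Char) (i : Nat) (h : ¬ i < n) :
    pvA_skip n l i = i := by
  rw [pvA_skip, dif_neg (fun hc => h hc.1)]

-- terminal cases (position at or past the end)
theorem pv_P_term (cs : List Char) (i : Nat) (hin : cs.length ≤ i) (l : List Char)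
    (hlen : l.length = cs.length) :
    pvA_loop2 cs.length l i = l.take i ++ pvB_pass (cs.drop i) false false := by
  rw [pv_loop2_stop _ _ _ (by omega), List.drop_eq_nil_of_le hin]
  show l = l.take i ++ []
  rw [List.append_nil, List.take_of_length_le (by omega)]

theorem pv_Q_term (cs : List Char) (i : Nat) (hin : cs.length ≤ i) (l : List Char)
    (hlen : l.length = cs.length) :
    pvA_loop2 cs.length
      (if pvA_skip cs.length l i < cs.length then pvA_capAt l (pvA_skip cs.length l i) else l)
      (pvA_skip cs.length l i + 1)
      = l.take i ++ pvB_pass (cs.drop i) false true := by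
  rw [pv_skip_id _ _ _ (by omega), if_neg (by omega),
    pv_loop2_stop _ _ _ (by omega), List.drop_eq_nil_of_le hin]
  show l = l.take i ++ []
  rw [List.append_nil, List.take_of_length_le (by omega)]

theorem pv_PQ (cs : List Char) : ∀ (d i : Nat), cs.length - i ≤ d →
    (∀ l : List Char, l.length = cs.length →
      (∀ k, i ≤ k → l.getD k ' ' = cs.getD k ' ') →
      pvA_loop2 cs.length l i = l.take i ++ pvB_pass (cs.drop i) false false) ∧
    (∀ l : List Char, l.length = cs.length →
      (∀ k, i ≤ k → l.getD k ' ' = cs.getD k ' ') →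
      pvA_loop2 cs.length
        (if pvA_skip cs.length l i < cs.length then pvA_capAt l (pvA_skip cs.length l i) else l)
        (pvA_skip cs.length l i + 1)
        = l.take i ++ pvB_pass (cs.drop i) false true) := by
  intro d
  induction d with
  | zero =>
    intro i hd
    exact ⟨fun l hlen _ => pv_P_term cs i (by omega) l hlen,
           fun l hlen _ => pv_Q_term cs i (by omega) l hlen⟩
  | succ d ih =>
    intro i hd
    by_cases hi : i < cs.length
    · constructor
      · -- P at i < n
        intro l hlen hag
        have hc : l.getD i ' ' = cs.getD i ' ' := hag i le_rfl
        have hdrop : cs.drop i = cs.getD i ' ' :: cs.drop (i+1) := by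
          rw [List.drop_eq_getElem_cons hi, pv_getD_lt cs i hi]
        rw [pvA_loop2, dif_pos hi]
        by_cases hp : l.getD i ' ' = '!' ∨ l.getD i ' ' = '?' ∨ l.getD i ' ' = '.'
        · rw [if_pos hp]
          show pvA_loop2 cs.length
              (if pvA_skip cs.length l (i+1) < cs.length then
                pvA_capAt l (pvA_skip cs.length l (i+1)) else l)
              (pvA_skip cs.length l (i+1) + 1) = _
          rw [(ih (i+1) (by omega)).2 l hlen (fun k hk => hag k (by omega))]
          have hpc : pvB_punct (cs.getD i ' ') = true := (pv_punct_iff _).1 (hc ▸ hp)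
          rw [hdrop, pv_pass_cons_ff, hpc, pv_take_succ_getD l i (by omega), hc]
          simp [List.append_assoc]
        · rw [if_neg hp]
          rw [(ih (i+1) (by omega)).1 l hlen (fun k hk => hag k (by omega))]
          rw [hc] at hp
          have hpc : pvB_punct (cs.getD i ' ') = false := by
            cases hq : pvB_punct (cs.getD i ' ')
            · rfl
            · exact absurd ((pv_punct_iff _).2 hq) hp
          rw [hdrop, pv_pass_cons_ff, hpc, pv_take_succ_getD l i (by omega), hc]
          simp [List.append_assoc]
      · -- Q at i < n
        intro l hlen hag
        have hji : i ≤ pvA_skip cs.length l i := pvA_skip_ge _ _ _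
        have hjle : pvA_skip cs.length l i ≤ cs.length := pvA_skip_le _ _ _ (by omega)
        have hsp := pvA_skip_spaces cs.length l i
        have hspc : ∀ k, i ≤ k → k < pvA_skip cs.length l i → cs.getD k ' ' = ' ' :=
          fun k h1 h2 => (hag k h1) ▸ hsp k h1 h2
        set j := pvA_skip cs.length l i with hjdef
        have hdl : l.drop i = cs.drop i := pv_drop_eq_of_agree l cs i (by omega) hag
        by_cases hjn : j < cs.length
        · rw [if_pos hjn, pv_capAt_eq_set l j (by omega)]
          set u := PySem.Chars.upperChar (l.getD j ' ') with hudef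
          rw [(ih (j+1) (by omega)).1 (l.set j u) (by simp [hlen])
            (fun k hk => by rw [pv_getD_set_ne l u j k (by omega), hag k (by omega)])]
          rw [pv_set_take_succ l j u (by omega)]
          have hstop : cs.getD j ' ' ≠ ' ' := by
            rw [← hag j hji]
            exact pvA_skip_stop cs.length l i hjn
          rw [pv_drop_decomp cs i j hji hjn,
            pvB_pass_spaces_flag _ _ (pv_seg_spaces cs i j hji hspc),
            pv_pass_cons_ft _ _ hstop]
          have hu : u = PySem.Chars.upperChar (cs.getD j ' ') := by rw [hudef, hag j hji]
          have htj : l.take j = l.take i ++ (cs.drop i).take (j - i) := by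
            rw [← hdl]
            conv_lhs => rw [show j = i + (j - i) by omega, List.take_add]
          rw [htj, hu]
          simp [List.append_assoc]
        · rw [if_neg hjn, pv_loop2_stop _ _ _ (by omega)]
          have hall : ∀ c ∈ cs.drop i, c = ' ' := by
            intro c hcm
            obtain ⟨k, hk, he⟩ := List.getElem_of_mem hcm
            have hkl : i + k < cs.length := by simp at hk; omega
            rw [List.getElem_drop] at he
            rw [← he, ← pv_getD_lt cs _ hkl]
            exact hspc (i+k) (by omega) (by omega)
          have hps : pvB_pass (cs.drop i) false true = cs.drop i := by
            have h0 := pvB_pass_spaces_flag (cs.drop i) [] hall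
            simpa [pvB_pass] using h0
          rw [hps, ← hdl, List.take_append_drop]
    · exact ⟨fun l hlen _ => pv_P_term cs i (by omega) l hlen,
             fun l hlen _ => pv_Q_term cs i (by omega) l hlen⟩

theorem pv_getD_set_self (l : List Char) (u : Char) (j : Nat) (h : j < l.length) :
    (l.set j u).getD j ' ' = u := by
  simp [List.getD_eq_getElem?_getD, h]

-- A's second loop only steps over a run of spaces (they are not punctuation)
theorem pv_loop2_spaces (n : Nat) (l : List Char) : ∀ (d a b : Nat), b - a ≤ d → a ≤ b → b ≤ n →
    (∀ k, a ≤ k → k < b → l.getD k ' ' = ' ') → pvA_loop2 n l a = pvA_loop2 n l b := by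
  intro d
  induction d with
  | zero =>
    intro a b h1 h2 _ _
    have : a = b := by omega
    rw [this]
  | succ d ih =>
    intro a b h1 h2 h3 hsp
    rcases Nat.eq_or_lt_of_le h2 with he | hl
    · rw [he]
    · have ha : a < n := by omega
      have hsa : l.getD a ' ' = ' ' := hsp a le_rfl hl
      rw [pvA_loop2, dif_pos ha, if_neg (by rw [hsa]; simp)]
      exact ih (a+1) b (by omega) hl h3 (fun k hk1 hk2 => hsp k (by omega) hk2)

-- A's pass 1 followed by pass 2 equals B's single state machine pass
theorem pv_pass12 (cs : List Char) :
    pvA_loop2 cs.length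
      (if pvA_skip cs.length cs 0 < cs.length then pvA_capAt cs (pvA_skip cs.length cs 0) else cs) 0
      = pvB_pass cs true false := by
  have hj0 := pvA_skip_spaces cs.length cs 0
  set j0 := pvA_skip cs.length cs 0 with hj0def
  by_cases hj : j0 < cs.length
  · rw [if_pos hj, pv_capAt_eq_set cs j0 hj]
    set u := PySem.Chars.upperChar (cs.getD j0 ' ') with hudef
    set m1 := cs.set j0 u with hm1
    have hsp1 : ∀ k, (0:Nat) ≤ k → k < j0 → m1.getD k ' ' = ' ' := fun k h1 h2 => by
      rw [hm1, pv_getD_set_ne cs u j0 k (by omega)]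
      exact hj0 k (by omega) h2
    rw [pv_loop2_spaces cs.length m1 j0 0 j0 (by omega) (by omega) (by omega) hsp1]
    have hm1j : m1.getD j0 ' ' = u := by rw [hm1]; exact pv_getD_set_self cs u j0 hj
    have hcsj : cs.getD j0 ' ' ≠ ' ' := pvA_skip_stop _ _ _ hj
    have hdec : cs = cs.take j0 ++ cs.getD j0 ' ' :: cs.drop (j0+1) := by
      conv_lhs => rw [← List.take_append_drop j0 cs]
      rw [List.drop_eq_getElem_cons hj, pv_getD_lt cs j0 hj]
    have hallsp : ∀ c ∈ cs.take j0, c = ' ' := by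
      have h0 := pv_seg_spaces cs 0 j0 (by omega) (fun k _ h2 => hj0 k (by omega) h2)
      simpa using h0
    have hagree : ∀ k, j0 + 1 ≤ k → m1.getD k ' ' = cs.getD k ' ' :=
      fun k hk => by rw [hm1, pv_getD_set_ne cs u j0 k (by omega)]
    rw [pvA_loop2, dif_pos hj]
    by_cases hp : m1.getD j0 ' ' = '!' ∨ m1.getD j0 ' ' = '?' ∨ m1.getD j0 ' ' = '.'
    · rw [if_pos hp]
      show pvA_loop2 cs.length
          (if pvA_skip cs.length m1 (j0+1) < cs.length then
            pvA_capAt m1 (pvA_skip cs.length m1 (j0+1)) else m1)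
          (pvA_skip cs.length m1 (j0+1) + 1) = _
      rw [(pv_PQ cs cs.length (j0+1) (by omega)).2 m1 (by rw [hm1]; simp) hagree]
      rw [hm1, pv_set_take_succ cs j0 u hj]
      have hpu : pvB_punct (cs.getD j0 ' ') = true := by
        rw [hm1j] at hp
        have h1 : pvB_punct u = true := (pv_punct_iff u).1 hp
        rw [hudef, pv_punct_upper] at h1
        exact h1
      conv_rhs => rw [hdec]
      rw [pvB_pass_spaces _ _ hallsp true, pv_pass_cons_tf _ _ hcsj, hpu]
      simp [List.append_assoc]
      exact hudef
    · rw [if_neg hp]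
      rw [(pv_PQ cs cs.length (j0+1) (by omega)).1 m1 (by rw [hm1]; simp) hagree]
      rw [hm1, pv_set_take_succ cs j0 u hj]
      have hpu : pvB_punct (cs.getD j0 ' ') = false := by
        rw [hm1j] at hp
        have h1 : pvB_punct u = false := by
          cases hq : pvB_punct u
          · rfl
          · exact absurd ((pv_punct_iff u).2 hq) hp
        rw [hudef, pv_punct_upper] at h1
        exact h1
      conv_rhs => rw [hdec]
      rw [pvB_pass_spaces _ _ hallsp true, pv_pass_cons_tf _ _ hcsj, hpu]
      simp [List.append_assoc]
      exact hudef
  · rw [if_neg hj]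
    have hallsp : ∀ k, k < cs.length → cs.getD k ' ' = ' ' :=
      fun k hk => hj0 k (by omega) (by omega)
    rw [pv_loop2_spaces cs.length cs cs.length 0 cs.length (by omega) (by omega) (by omega)
      (fun k _ hk => hallsp k hk)]
    rw [pv_loop2_stop _ _ _ (by omega)]
    have hmem : ∀ c ∈ cs, c = ' ' := by
      intro c hcm
      obtain ⟨k, hk, he⟩ := List.getElem_of_mem hcm
      rw [← he, ← pv_getD_lt cs k hk]
      exact hallsp k hk
    have h0 := pvB_pass_spaces cs [] hmem true
    simpa [pvB_pass] using h0.symm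

-- ---- pass 3 equals the neighborhood map ----

def pvResElem (m : List Char) (i : Nat) : Char :=
  if 0 < i ∧ i < m.length - 1 ∧ m.getD i ' ' = 'i' ∧
      pvB_cls (m.getD (i-1) ' ') = true ∧ pvB_cls (m.getD (i+1) ' ') = true
  then 'I' else m.getD i ' '

def pvRes (m : List Char) : List Char := (List.range m.length).map (pvResElem m)

theorem pv_res_length (m : List Char) : (pvRes m).length = m.length := by
  simp [pvRes]

theorem pv_res_getElem (m : List Char) (k : Nat) (h : k < m.length) :
    (pvRes m).getD k ' ' = pvResElem m k := by
  rw [pv_getD_lt _ _ (by simpa [pvRes] using h)]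
  simp [pvRes]

-- capitalizing a standalone lowercase i to 'I' never changes membership in " .!?'"
theorem pv_cls_resElem (m : List Char) (k : Nat) :
    pvB_cls (pvResElem m k) = pvB_cls (m.getD k ' ') := by
  unfold pvResElem
  split
  · rename_i hc
    rw [hc.2.2.1]
    decide
  · rfl

theorem pv_resElem_triv (m : List Char) (k : Nat) (h : ¬ k < m.length - 1 ∨ k = 0) :
    pvResElem m k = m.getD k ' ' := by
  unfold pvResElem
  rw [if_neg]
  rintro ⟨h1, h2, _⟩
  rcases h with h | h
  · exact h h2
  · omega

theorem pv_L3 (m : List Char) : ∀ (d i : Nat) (l' : List Char), m.length - i ≤ d → 1 ≤ i →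
    l'.length = m.length →
    (∀ k, i ≤ k → l'.getD k ' ' = m.getD k ' ') →
    (∀ k, k < i → l'.getD k ' ' = pvResElem m k) →
    pvA_loop3 m.length l' i = pvRes m := by
  intro d
  induction d with
  | zero =>
    intro i l' hd h1 hlen hag hpre
    rw [pvA_loop3, if_neg (by omega)]
    apply List.ext_getElem (by rw [hlen, pv_res_length])
    intro k hk1 hk2
    rw [← pv_getD_lt l' k hk1, ← pv_getD_lt (pvRes m) k hk2,
      pv_res_getElem m k (by omega)]
    by_cases hki : k < i
    · exact hpre k hki
    · rw [hag k (by omega), pv_resElem_triv m k (Or.inl (by omega))]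
  | succ d ih =>
    intro i l' hd h1 hlen hag hpre
    by_cases hi : i < m.length - 1
    · have hL'i : l'.getD i ' ' = m.getD i ' ' := hag i le_rfl
      have hL'i1 : l'.getD (i+1) ' ' = m.getD (i+1) ' ' := hag _ (by omega)
      have hL'im : l'.getD (i-1) ' ' = pvResElem m (i-1) := hpre (i-1) (by omega)
      have hiff : ((l'.getD (i-1) ' ' = ' ' ∨ l'.getD (i-1) ' ' = '.' ∨ l'.getD (i-1) ' ' = '!' ∨
            l'.getD (i-1) ' ' = '?' ∨ l'.getD (i-1) ' ' = '\'') ∧ l'.getD i ' ' = 'i' ∧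
          (l'.getD (i+1) ' ' = ' ' ∨ l'.getD (i+1) ' ' = '.' ∨ l'.getD (i+1) ' ' = '!' ∨
            l'.getD (i+1) ' ' = '?' ∨ l'.getD (i+1) ' ' = '\'')) ↔
          (0 < i ∧ i < m.length - 1 ∧ m.getD i ' ' = 'i' ∧
            pvB_cls (m.getD (i-1) ' ') = true ∧ pvB_cls (m.getD (i+1) ' ') = true) := by
        rw [hL'i, hL'i1, hL'im, pv_cls_iff, pv_cls_iff, pv_cls_resElem]
        constructor
        · rintro ⟨a, b, c⟩
          exact ⟨by omega, hi, b, a, c⟩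
        · rintro ⟨_, _, b, a, c⟩
          exact ⟨a, b, c⟩
      rw [pvA_loop3, if_pos hi]
      show pvA_loop3 m.length
          (if (l'.getD (i-1) ' ' = ' ' ∨ l'.getD (i-1) ' ' = '.' ∨ l'.getD (i-1) ' ' = '!' ∨
                l'.getD (i-1) ' ' = '?' ∨ l'.getD (i-1) ' ' = '\'') ∧ l'.getD i ' ' = 'i' ∧
              (l'.getD (i+1) ' ' = ' ' ∨ l'.getD (i+1) ' ' = '.' ∨ l'.getD (i+1) ' ' = '!' ∨
                l'.getD (i+1) ' ' = '?' ∨ l'.getD (i+1) ' ' = '\'')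
            then pvA_capAt l' i else l') (i + 1) = pvRes m
      by_cases hcB : (0 < i ∧ i < m.length - 1 ∧ m.getD i ' ' = 'i' ∧
          pvB_cls (m.getD (i-1) ' ') = true ∧ pvB_cls (m.getD (i+1) ' ') = true)
      · rw [if_pos (hiff.mpr hcB), pv_capAt_eq_set l' i (by omega)]
        have hii : l'.getD i ' ' = 'i' := by rw [hL'i]; exact hcB.2.2.1
        rw [hii, pv_upper_i]
        apply ih (i+1) (l'.set i 'I') (by omega) (by omega) (by simp [hlen])
        · intro k hk
          rw [pv_getD_set_ne l' 'I' i k (by omega)]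
          exact hag k (by omega)
        · intro k hk
          by_cases hki : k < i
          · rw [pv_getD_set_ne l' 'I' i k (by omega)]
            exact hpre k hki
          · have hke : k = i := by omega
            subst hke
            rw [pv_getD_set_self l' 'I' k (by omega)]
            unfold pvResElem
            rw [if_pos hcB]
      · rw [if_neg (fun hcA => hcB (hiff.mp hcA))]
        apply ih (i+1) l' (by omega) (by omega) hlen
        · intro k hk
          exact hag k (by omega)
        · intro k hk
          by_cases hki : k < i
          · exact hpre k hki
          · have hke : k = i := by omega
            subst hke
            rw [hag k le_rfl]
            unfold pvResElem
            rw [if_neg hcB]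
    · rw [pvA_loop3, if_neg hi]
      apply List.ext_getElem (by rw [hlen, pv_res_length])
      intro k hk1 hk2
      rw [← pv_getD_lt l' k hk1, ← pv_getD_lt (pvRes m) k hk2,
        pv_res_getElem m k (by omega)]
      by_cases hki : k < i
      · exact hpre k hki
      · rw [hag k (by omega), pv_resElem_triv m k (Or.inl (by omega))]

-- ===== VERDICT (by name: the statement is the Claim_ definition above) =====
theorem capitalizeIt_spec : Claim_equal_capitalizeIt := by
  intro s _
  unfold Spec_capitalizeIt capitalizeIt capitalizeIt_alt
  show String.ofList
      (pvA_loop3 s.toList.length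
        (pvA_loop2 s.toList.length
          (if pvA_skip s.toList.length s.toList 0 < s.toList.length then
            pvA_capAt s.toList (pvA_skip s.toList.length s.toList 0)
          else s.toList) 0) 1) = _
  rw [pv_pass12 s.toList]
  have hlm : s.toList.length = (pvB_pass s.toList true false).length :=
    (pvB_pass_length s.toList true false).symm
  rw [hlm]
  rw [pv_L3 (pvB_pass s.toList true false) (pvB_pass s.toList true false).length 1
    (pvB_pass s.toList true false) (by omega) le_rfl rfl (fun k _ => rfl)
    (fun k hk => by
      have hk0 : k = 0 := by omega
      subst hk0
      rw [pv_resElem_triv _ 0 (Or.inr rfl)])]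
  rfl
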